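-- pv_equiv track=rewrite | github.com/CoronaWhy/task-risk | task_risk/n_grams_search.py | search_in_ngrams
-- ===== SOURCE A (Python) =====
-- def search_in_ngrams(ngrams, search_terms):
--     results = {}
--     for term in search_terms:
--         results[term] = []
--         for ngram_tuple in ngrams:
--             if any(map(lambda x: x == term, ngram_tuple)):
--                 results[term].append(ngram_tuple)
--     return results
-- ===== SOURCE B (Python) =====
-- def search_in_ngrams(ngrams, search_terms):
--     # Flatten ngrams into (element, tuple) postings (distinct elements per
--     # tuple), group them once into an inverted index, then each distinct
--     # search term is a single dictionary lookup.
--     postings = [(x, tup) for tup in ngrams for x in dict.fromkeys(tup)]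
--     index = {}
--     for x, tup in postings:
--         index.setdefault(x, []).append(tup)
--     return {t: index.get(t, []) for t in dict.fromkeys(search_terms)}
-- ===== Notes on version B (the rewrite author's own statement) =====
-- stated objective: faster
-- what changed: Replaces A's per-term rescan of all ngrams with a flattened (element, tuple) postings list grouped once into an inverted index, then one dictionary lookup per distinct search term.
import Mathlib
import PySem

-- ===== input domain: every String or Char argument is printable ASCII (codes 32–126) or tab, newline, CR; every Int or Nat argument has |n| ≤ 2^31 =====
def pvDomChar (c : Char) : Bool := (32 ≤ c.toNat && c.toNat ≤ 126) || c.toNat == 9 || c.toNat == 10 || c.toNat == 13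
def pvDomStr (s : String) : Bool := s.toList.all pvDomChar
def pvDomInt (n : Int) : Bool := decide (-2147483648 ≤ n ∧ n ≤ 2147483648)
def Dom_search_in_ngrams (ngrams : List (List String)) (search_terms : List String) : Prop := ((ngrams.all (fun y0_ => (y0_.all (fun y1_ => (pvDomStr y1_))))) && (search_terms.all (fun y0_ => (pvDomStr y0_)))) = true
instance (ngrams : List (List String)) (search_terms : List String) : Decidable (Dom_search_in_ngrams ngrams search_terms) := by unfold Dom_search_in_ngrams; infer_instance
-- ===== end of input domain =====

-- B replaces A's per-term rescan of ngrams with a flattened postings list grouped once into an inverted index and a per-term lookup (faster, asymptotic).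


-- ===== PORT A =====
def search_in_ngrams (ngrams : List (List String)) (search_terms : List String) : List (String × List (List String)) :=
  -- results = {}; for term in search_terms: results[term] = []; for ngram_tuple in ngrams: if any(x == term): results[term].append(ngram_tuple)
  (search_terms.foldl
    (fun results term =>
      ngrams.foldl
        (fun results ngram_tuple =>
          if ngram_tuple.any (fun x => x == term) then
            results.modify term [] (fun l => l ++ [ngram_tuple])
          else results)
        (results.insert term []))
    PySem.Dict.empty).items

-- ===== PORT B =====
def search_in_ngrams_alt (ngrams : List (List String)) (search_terms : List String) : List (String × List (List String)) :=
  -- postings = [(x, tup) for tup in ngrams for x in dict.fromkeys(tup)]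
  let postings : List (String × List String) :=
    ngrams.flatMap (fun tup => (PySem.List.dedup tup).map (fun x => (x, tup)))
  -- index = {}; for x, tup in postings: index.setdefault(x, []).append(tup)
  let index : PySem.Dict String (List (List String)) :=
    postings.foldl (fun d p => d.modify p.1 [] (fun l => l ++ [p.2])) PySem.Dict.empty
  -- {t: index.get(t, []) for t in dict.fromkeys(search_terms)}
  -- (keys of dict.fromkeys are distinct, so the comprehension's dict IS this association list)
  (PySem.List.dedup search_terms).map (fun t => (t, index.getD t []))

-- ===== PRECONDITION & SPEC =====
def Spec_search_in_ngrams (ngrams : List (List String)) (search_terms : List String) (out : List (String × List (List String))) : Prop := out = search_in_ngrams_alt ngrams search_terms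
instance (ngrams : List (List String)) (search_terms : List String) (out : List (String × List (List String))) : Decidable (Spec_search_in_ngrams ngrams search_terms out) := by unfold Spec_search_in_ngrams; infer_instance

-- ===== CLAIM (what is proved, stated in full; the proofs are below) =====
def Claim_equal_search_in_ngrams : Prop := ∀ (ngrams : List (List String)) (search_terms : List String), Dom_search_in_ngrams ngrams search_terms → Spec_search_in_ngrams ngrams search_terms (search_in_ngrams ngrams search_terms)

-- ===== LEMMAS AND PROOFS =====

-- A's inner loop over ngrams, starting from results[term] = acc, leaves entry term = acc ++ filtered ngrams.
theorem A_inner (ngrams : List (List String)) (term : String)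
    (d : PySem.Dict String (List (List String))) (acc : List (List String)) :
    ngrams.foldl
      (fun results ngram_tuple =>
        if ngram_tuple.any (fun x => x == term) then
          results.modify term [] (fun l => l ++ [ngram_tuple])
        else results)
      (d.insert term acc)
    = d.insert term (acc ++ ngrams.filter (fun t => t.any (fun x => x == term))) := by
  induction ngrams generalizing acc with
  | nil => simp
  | cons t ts ih =>
    simp only [List.foldl_cons, List.filter_cons]
    by_cases h : t.any (fun x => x == term)
    · rw [if_pos h, PySem.Dict.modify, PySem.Dict.getD_insert_self,
        PySem.Dict.insert_insert_self, ih, h]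
      simp
    · rw [if_neg h, ih]
      simp [h]

-- A's whole loop is a fold of plain inserts of per-key values.
theorem A_as_inserts (ngrams : List (List String)) (search_terms : List String)
    (d : PySem.Dict String (List (List String))) :
    search_terms.foldl
      (fun results term =>
        ngrams.foldl
          (fun results ngram_tuple =>
            if ngram_tuple.any (fun x => x == term) then
              results.modify term [] (fun l => l ++ [ngram_tuple])
            else results)
          (results.insert term []))
      d
    = search_terms.foldl
        (fun r t => r.insert t (ngrams.filter (fun u => u.any (fun x => x == t)))) d := by
  induction search_terms generalizing d with
  | nil => rfl
  | cons t ts ih =>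
    simp only [List.foldl_cons]
    rw [A_inner ngrams t d [], List.nil_append, ih]

-- Lookup in a fold of inserts whose value depends only on the key.
theorem getD_foldl_insert_fn (F : String → List (List String)) (terms : List String)
    (d : PySem.Dict String (List (List String))) (k : String) :
    (terms.foldl (fun r t => r.insert t (F t)) d).getD k []
    = if k ∈ terms then F k else d.getD k [] := by
  induction terms generalizing d with
  | nil => simp
  | cons t ts ih =>
    simp only [List.foldl_cons, List.mem_cons]
    rw [ih]
    by_cases hm : k ∈ ts
    · simp [hm]
    · by_cases he : k = t <;> simp [hm, he, PySem.Dict.getD_insert]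

-- Filtering the postings of one tuple keeps exactly the posting for q (xs nodup).
theorem filter_postings (xs : List String) (t : List String) (q : String) (hnd : xs.Nodup) :
    (xs.map (fun x => (x, t))).filter (fun p => p.1 == q)
    = if q ∈ xs then [(q, t)] else [] := by
  induction xs with
  | nil => simp
  | cons y ys ih =>
    have htail := ih (List.Nodup.of_cons hnd)
    simp only [List.map_cons, List.filter_cons, List.mem_cons]
    by_cases hy : y = q
    · have hq : q ∉ ys := hy ▸ (List.nodup_cons.mp hnd).1
      rw [htail, if_neg hq]
      simp [hy]
    · rw [htail]
      simp only [show (y == q) = false from beq_eq_false_iff_ne.mpr hy]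
      by_cases hm : q ∈ ys <;> simp [hm, Ne.symm hy]

-- B's index entry for q is exactly the tuples containing q, in order.
theorem B_index_getD (ngrams : List (List String)) (q : String) :
    ((ngrams.flatMap (fun tup => (PySem.List.dedup tup).map (fun x => (x, tup)))).foldl
        (fun d p => d.modify p.1 [] (fun l => l ++ [p.2])) PySem.Dict.empty).getD q []
    = ngrams.filter (fun t => t.any (fun x => x == q)) := by
  rw [PySem.Dict.getD_foldl_modify_append]
  simp only [PySem.Dict.getD_empty, List.nil_append]
  induction ngrams with
  | nil => rfl
  | cons t ts ih =>
    simp only [List.flatMap_cons, List.filter_append, List.map_append, ih, List.filter_cons]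
    rw [filter_postings (PySem.List.dedup t) t q (PySem.List.nodup_dedup t)]
    have hmem : (q ∈ PySem.List.dedup t) ↔ (t.any (fun x => x == q) = true) := by
      rw [PySem.List.mem_dedup]
      simp only [List.any_eq_true, beq_iff_eq]
      exact ⟨fun h => ⟨q, h, rfl⟩, fun ⟨x, hx, he⟩ => he ▸ hx⟩
    by_cases h : t.any (fun x => x == q)
    · rw [h, if_pos (hmem.mpr h)]; simp
    · have hb : t.any (fun x => x == q) = false := Bool.eq_false_iff.mpr h
      rw [hb, if_neg (fun hm => h (hmem.mp hm))]; simp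

-- ===== VERDICT (by name: the statement is the Claim_ definition above) =====
theorem search_in_ngrams_spec : Claim_equal_search_in_ngrams := by
  intro ngrams search_terms hdom
  clear hdom
  unfold Spec_search_in_ngrams search_in_ngrams search_in_ngrams_alt
  rw [A_as_inserts]
  set F : String → List (List String) :=
    fun t => ngrams.filter (fun u => u.any (fun x => x == t)) with hF
  set d := search_terms.foldl (fun r t => r.insert t (F t)) PySem.Dict.empty with hd
  have hnd : d.keys.Nodup := by
    rw [hd]
    exact PySem.Dict.nodup_keys_foldl_insert search_terms (fun r t => F t) _
      (by simp)
  have hkeys : d.keys = PySem.List.dedup search_terms := by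
    rw [hd, PySem.Dict.keys_foldl_insert]
    simp [PySem.List.dedup_eq_ofList, PySem.Dict.keys_empty, PySem.Set.update, ← PySem.Set.ofList_eq_foldl]
  rw [PySem.Dict.items_eq_map_keys d hnd [], hkeys]
  refine List.map_congr_left (fun t ht => ?_)
  have htm : t ∈ search_terms := (PySem.List.mem_dedup search_terms t).mp ht
  rw [hd, getD_foldl_insert_fn, if_pos htm, B_index_getD]
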